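-- pv_equiv track=rewrite | github.com/GuyCarver/raspi | sevenseg.py | flipdigit
-- ===== SOURCE A (Python) =====
-- def flipdigit( aByte ) :
--   bit = 1
--   f = 0
--   #swap bits 0-2 with 3-5 (0-3, 1-4, 2-5)
--   for x in range(3):
--     f |= (aByte & bit) << 3
--     bit <<= 1
--   for x in range(3, 6):
--     f |= (aByte & bit) >> 3
--     bit <<= 1
--   f |= aByte & 0xC0 #Keep the rest of the bits.
--   return f
-- ===== SOURCE B (Python) =====
-- def flipdigit( aByte ) :
--   return ((aByte & 0x07) << 3) | ((aByte & 0x38) >> 3) | (aByte & 0xC0)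
-- ===== Notes on version B (the rewrite author's own statement) =====
-- stated objective: simpler
-- what changed: Replaces the two bit-by-bit accumulation loops with running bit/f state by one closed-form expression that swaps the whole three-bit fields using field masks and keeps the top two bits.
import Mathlib
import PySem

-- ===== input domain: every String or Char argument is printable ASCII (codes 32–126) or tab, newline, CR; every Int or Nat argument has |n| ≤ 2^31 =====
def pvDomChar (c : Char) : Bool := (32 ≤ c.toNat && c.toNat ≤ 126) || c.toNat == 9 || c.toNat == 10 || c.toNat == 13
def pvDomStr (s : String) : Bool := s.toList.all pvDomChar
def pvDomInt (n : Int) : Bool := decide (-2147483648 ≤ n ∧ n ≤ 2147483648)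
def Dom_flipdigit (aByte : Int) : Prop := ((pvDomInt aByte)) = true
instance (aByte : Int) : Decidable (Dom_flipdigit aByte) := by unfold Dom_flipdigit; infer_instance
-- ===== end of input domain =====

-- B replaces A's two bit-by-bit accumulation loops (running bit/f state) by one
-- closed-form expression swapping the whole 3-bit fields with masks 0x07/0x38/0xC0 (simpler).

-- ===== PORT A =====
-- two loops with state (bit, f); each step: f |= (aByte & bit) << 3 resp. >> 3, then bit <<= 1
def flipdigit (aByte : Int) : Int :=
  let st1 := (PySem.List.pyRange 0 3 1).foldl
    (fun (st : Int × Int) _ =>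
      (st.1 <<< (1:Nat), PySem.Int.bor st.2 ((PySem.Int.band aByte st.1) <<< (3:Nat)))) (1, 0)
  let st2 := (PySem.List.pyRange 3 6 1).foldl
    (fun (st : Int × Int) _ =>
      (st.1 <<< (1:Nat), PySem.Int.bor st.2 ((PySem.Int.band aByte st.1) >>> (3:Nat)))) st1
  PySem.Int.bor st2.2 (PySem.Int.band aByte 0xC0)

-- ===== PORT B =====
def flipdigit_alt (aByte : Int) : Int :=
  PySem.Int.bor (PySem.Int.bor ((PySem.Int.band aByte 0x07) <<< (3:Nat))
    ((PySem.Int.band aByte 0x38) >>> (3:Nat))) (PySem.Int.band aByte 0xC0)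

-- ===== PRECONDITION & SPEC =====
def Spec_flipdigit (aByte : Int) (out : Int) : Prop := out = flipdigit_alt aByte
instance (aByte : Int) (out : Int) : Decidable (Spec_flipdigit aByte out) := by unfold Spec_flipdigit; infer_instance

-- ===== CLAIM (what is proved, stated in full; the proofs are below) =====
def Claim_equal_flipdigit : Prop := ∀ (aByte : Int), Dom_flipdigit aByte → Spec_flipdigit aByte (flipdigit aByte)

-- ===== LEMMAS AND PROOFS =====

-- under a mask m < 256, only the low byte of x matters
theorem land_mod (x m : Nat) (hm : m < 256) : m &&& x = m &&& (x % 256) := by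
  apply Nat.eq_of_testBit_eq
  intro i
  rw [show (256:Nat) = 2 ^ 8 from rfl]
  simp only [Nat.testBit_land, Nat.testBit_mod_two_pow]
  by_cases h : i < 8
  · simp [h]
  · have : m.testBit i = false := Nat.testBit_lt_two_pow (by
      calc m < 256 := hm
      _ = 2 ^ 8 := rfl
      _ ≤ 2 ^ i := Nat.pow_le_pow_right (by norm_num) (by omega))
    simp [this]

theorem land_mod' (x m : Nat) (hm : m < 256) : x &&& m = (x % 256) &&& m := by
  rw [Nat.land_comm, land_mod x m hm, Nat.land_comm]

set_option maxRecDepth 8192 in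
-- per-bit accumulation = whole-field masking, checked on every low byte (aByte ≥ 0)
theorem key_pos : ∀ j < 256,
    ((((((0 ||| ((j &&& 1) <<< 3)) ||| ((j &&& 2) <<< 3)) ||| ((j &&& 4) <<< 3))
      ||| ((j &&& 8) >>> 3)) ||| ((j &&& 16) >>> 3)) ||| ((j &&& 32) >>> 3)) ||| (j &&& 192)
    = (((j &&& 7) <<< 3) ||| ((j &&& 56) >>> 3)) ||| (j &&& 192) := by decide

set_option maxRecDepth 8192 in
-- same for aByte < 0, whose Python bits are the complement of k = -aByte - 1
theorem key_neg : ∀ j < 256,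
    ((((((0 ||| ((1 - (1 &&& j)) <<< 3)) ||| ((2 - (2 &&& j)) <<< 3)) ||| ((4 - (4 &&& j)) <<< 3))
      ||| ((8 - (8 &&& j)) >>> 3)) ||| ((16 - (16 &&& j)) >>> 3)) ||| ((32 - (32 &&& j)) >>> 3)) ||| (192 - (192 &&& j))
    = (((7 - (7 &&& j)) <<< 3) ||| ((56 - (56 &&& j)) >>> 3)) ||| (192 - (192 &&& j)) := by decide

theorem flipdigit_eq (a : Int) : flipdigit a = flipdigit_alt a := by
  have hr1 : PySem.List.pyRange 0 3 1 = [0, 1, 2] := by decide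
  have hr2 : PySem.List.pyRange 3 6 1 = [3, 4, 5] := by decide
  simp only [flipdigit, flipdigit_alt, hr1, hr2, List.foldl]
  simp only [show (1:Int) <<< (1:Nat) = 2 from by decide, show (2:Int) <<< (1:Nat) = 4 from by decide,
    show (4:Int) <<< (1:Nat) = 8 from by decide, show (8:Int) <<< (1:Nat) = 16 from by decide,
    show (16:Int) <<< (1:Nat) = 32 from by decide]
  simp only [show (0:Int) = (((0:Nat)):Int) from rfl, show (1:Int) = (((1:Nat)):Int) from rfl,
    show (2:Int) = (((2:Nat)):Int) from rfl, show (4:Int) = (((4:Nat)):Int) from rfl,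
    show (8:Int) = (((8:Nat)):Int) from rfl, show (16:Int) = (((16:Nat)):Int) from rfl,
    show (32:Int) = (((32:Nat)):Int) from rfl, show (192:Int) = (((192:Nat)):Int) from rfl,
    show (7:Int) = (((7:Nat)):Int) from rfl, show (56:Int) = (((56:Nat)):Int) from rfl]
  by_cases h : 0 ≤ a
  · have hb : ∀ m : Nat, PySem.Int.band a ((m:Nat) : Int) = ((a.toNat &&& m : Nat) : Int) := by
      intro m; simp [PySem.Int.band, h, Int.toNat_natCast]
    simp only [hb, ← Int.natCast_shiftLeft, ← Int.natCast_shiftRight, PySem.Int.bor_natCast,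
      Nat.cast_inj]
    rw [land_mod' a.toNat 1 (by norm_num), land_mod' a.toNat 2 (by norm_num),
      land_mod' a.toNat 4 (by norm_num), land_mod' a.toNat 8 (by norm_num),
      land_mod' a.toNat 16 (by norm_num), land_mod' a.toNat 32 (by norm_num),
      land_mod' a.toNat 192 (by norm_num), land_mod' a.toNat 7 (by norm_num),
      land_mod' a.toNat 56 (by norm_num)]
    exact key_pos _ (Nat.mod_lt _ (by norm_num))
  · have hb : ∀ m : Nat, PySem.Int.band a ((m:Nat) : Int) =
        ((m - (m &&& (-a - 1).toNat) : Nat) : Int) := by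
      intro m; simp [PySem.Int.band, h, Int.toNat_natCast]
    simp only [hb, ← Int.natCast_shiftLeft, ← Int.natCast_shiftRight, PySem.Int.bor_natCast,
      Nat.cast_inj]
    rw [land_mod (-a-1).toNat 1 (by norm_num), land_mod (-a-1).toNat 2 (by norm_num),
      land_mod (-a-1).toNat 4 (by norm_num), land_mod (-a-1).toNat 8 (by norm_num),
      land_mod (-a-1).toNat 16 (by norm_num), land_mod (-a-1).toNat 32 (by norm_num),
      land_mod (-a-1).toNat 192 (by norm_num), land_mod (-a-1).toNat 7 (by norm_num),
      land_mod (-a-1).toNat 56 (by norm_num)]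
    exact key_neg _ (Nat.mod_lt _ (by norm_num))

-- ===== VERDICT (by name: the statement is the Claim_ definition above) =====
theorem flipdigit_spec : Claim_equal_flipdigit := by
  intro a _
  exact flipdigit_eq a
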